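-- pv_equiv track=rewrite | github.com/Bapt-M/ClimbTracker-Hueco | scripts/scrape-sboulder-detailed.py | extract_route_types
-- ===== SOURCE A (Python) =====
-- ROUTE_TYPES_MAP = {
--     "dalle": "Dalle", "devers": "Devers", "vertical": "Vertical",
--     "diedre": "Diedre", "arete": "Arete", "toit": "Toit",
--     "dynamique": "Dynamique", "dyno": "Dynamique", "equilibre": "Equilibre",
--     "coordination": "Coordination", "reglette": "Reglette", "pince": "Pince",
--     "bac": "Bac", "plat": "Plat", "arquee": "Arquee",
-- }
--
-- def extract_route_types(text):
--     if not text: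
--         return []
--     types = []
--     text_lower = text.lower()
--     for key, value in ROUTE_TYPES_MAP.items():
--         if key in text_lower and value not in types:
--             types.append(value)
--     return types
-- ===== SOURCE B (Python) =====
-- INVERTED = [
--     (["dalle"], "Dalle"), (["devers"], "Devers"), (["vertical"], "Vertical"),
--     (["diedre"], "Diedre"), (["arete"], "Arete"), (["toit"], "Toit"),
--     (["dynamique", "dyno"], "Dynamique"), (["equilibre"], "Equilibre"),
--     (["coordination"], "Coordination"), (["reglette"], "Reglette"),
--     (["pince"], "Pince"), (["bac"], "Bac"), (["plat"], "Plat"),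
--     (["arquee"], "Arquee"),
-- ]
--
--
-- def extract_route_types(text):
--     def pick(tl, entries):
--         if not entries:
--             return []
--         subs, label = entries[0]
--         rest = pick(tl, entries[1:])
--         return [label] + rest if any(s in tl for s in subs) else rest
--
--     return pick((text or "").lower(), INVERTED)
-- ===== Notes on version B (the rewrite author's own statement) =====
-- stated objective: alternative
-- what changed: Replaces the imperative append-with-dedup loop over the key-to-label dict by structural recursion over an inverted (synonyms, label) list (the two Dynamique synonyms grouped), dropping both the accumulator membership scan and the empty-text guard (no synonym matches the empty text).
import Mathlib
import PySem

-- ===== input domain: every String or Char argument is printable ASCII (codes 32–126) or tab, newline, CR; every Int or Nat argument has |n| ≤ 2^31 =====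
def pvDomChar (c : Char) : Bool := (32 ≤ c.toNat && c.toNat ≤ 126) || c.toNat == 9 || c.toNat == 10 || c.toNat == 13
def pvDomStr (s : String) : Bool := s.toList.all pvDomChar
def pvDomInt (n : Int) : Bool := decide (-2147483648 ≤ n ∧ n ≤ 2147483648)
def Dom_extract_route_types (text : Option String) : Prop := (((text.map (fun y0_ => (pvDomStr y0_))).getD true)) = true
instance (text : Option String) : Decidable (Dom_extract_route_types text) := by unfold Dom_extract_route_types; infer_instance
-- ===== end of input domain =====

-- B replaces A's imperative append-with-dedup loop by structural recursion over an inverted (synonyms, label) list (alternative decomposition; same cost).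

-- ===== PORT A =====
def routeTypesMap : List (String × String) :=
  [("dalle","Dalle"),("devers","Devers"),("vertical","Vertical"),("diedre","Diedre"),
   ("arete","Arete"),("toit","Toit"),("dynamique","Dynamique"),("dyno","Dynamique"),
   ("equilibre","Equilibre"),("coordination","Coordination"),("reglette","Reglette"),
   ("pince","Pince"),("bac","Bac"),("plat","Plat"),("arquee","Arquee")]

def extract_route_types (text : Option String) : List String :=
  match text with
  | none => []
  | some s =>
    if s = "" then []
    else
      routeTypesMap.foldl (fun types kv =>
        if PySem.Str.isIn kv.1 (PySem.Str.lower s) && !(types.contains kv.2) then types ++ [kv.2]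
        else types) []

-- ===== PORT B =====
def invertedList : List (List String × String) :=
  [(["dalle"],"Dalle"),(["devers"],"Devers"),(["vertical"],"Vertical"),(["diedre"],"Diedre"),
   (["arete"],"Arete"),(["toit"],"Toit"),(["dynamique","dyno"],"Dynamique"),
   (["equilibre"],"Equilibre"),(["coordination"],"Coordination"),(["reglette"],"Reglette"),
   (["pince"],"Pince"),(["bac"],"Bac"),(["plat"],"Plat"),(["arquee"],"Arquee")]

def pickTypes (tl : String) : List (List String × String) → List String
  | [] => []
  | (subs, label) :: entries =>
      let rest := pickTypes tl entries
      if subs.any (fun s => PySem.Str.isIn s tl) then label :: rest else rest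

def extract_route_types_alt (text : Option String) : List String :=
  pickTypes (PySem.Str.lower (text.getD "")) invertedList

-- ===== PRECONDITION & SPEC =====
def Spec_extract_route_types (text : Option String) (out : List String) : Prop := out = extract_route_types_alt text
instance (text : Option String) (out : List String) : Decidable (Spec_extract_route_types text out) := by unfold Spec_extract_route_types; infer_instance

-- ===== CLAIM (what is proved, stated in full; the proofs are below) =====
def Claim_equal_extract_route_types : Prop := ∀ (text : Option String), Dom_extract_route_types text → Spec_extract_route_types text (extract_route_types text)

-- ===== LEMMAS AND PROOFS =====

-- A's loop body, with the text fixed.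
def pvStep (tl : String) (types : List String) (kv : String × String) : List String :=
  if PySem.Str.isIn kv.1 tl && !(types.contains kv.2) then types ++ [kv.2] else types

-- A's key→label list is the flattening of B's inverted list.
def pvFlat (G : List (List String × String)) : List (String × String) :=
  G.flatMap (fun p => p.1.map (fun k => (k, p.2)))

lemma pickTypes_cons (tl : String) (ks : List String) (v : String) (G : List (List String × String)) :
    pickTypes tl ((ks, v) :: G) =
      if ks.any (fun k => PySem.Str.isIn k tl) then v :: pickTypes tl G else pickTypes tl G := rfl

lemma pvFlat_eq : pvFlat invertedList = routeTypesMap := by decide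

-- While the label is already accumulated, the loop is the identity.
lemma loop_mem (tl : String) (v : String) (ks : List String) (acc : List String) (h : v ∈ acc) :
    (ks.map (fun k => (k, v))).foldl (pvStep tl) acc = acc := by
  induction ks with
  | nil => rfl
  | cons k ks ih =>
    have hb : acc.contains v = true := by simpa using h
    simp only [List.map_cons, List.foldl_cons, pvStep, hb, Bool.not_true, Bool.and_false,
      Bool.false_eq_true, if_false]
    exact ih

-- One group of synonym keys appends its label iff some key matches.
lemma loop_group (tl : String) (v : String) (ks : List String) (acc : List String) (h : v ∉ acc) :
    (ks.map (fun k => (k, v))).foldl (pvStep tl) acc =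
      if ks.any (fun k => PySem.Str.isIn k tl) then acc ++ [v] else acc := by
  induction ks with
  | nil => simp
  | cons k ks ih =>
    have hacc : acc.contains v = false := by simpa using h
    simp only [List.map_cons, List.foldl_cons, pvStep, hacc, Bool.not_false, Bool.and_true]
    by_cases hk : PySem.Str.isIn k tl = true
    · rw [if_pos hk, loop_mem tl v ks (acc ++ [v]) (by simp),
        List.any_cons, hk, Bool.true_or, if_pos rfl]
    · simp only [Bool.not_eq_true] at hk
      rw [hk, List.any_cons, hk, Bool.false_or]
      simp only [Bool.false_eq_true, if_false]
      exact ih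

-- The whole loop over the flattened groups computes B's recursion, given fresh distinct labels.
lemma loop_flat (tl : String) (G : List (List String × String)) (acc : List String)
    (hfresh : ∀ p ∈ G, p.2 ∉ acc) (hnd : (G.map Prod.snd).Nodup) :
    (pvFlat G).foldl (pvStep tl) acc = acc ++ pickTypes tl G := by
  induction G generalizing acc with
  | nil => simp [pvFlat, pickTypes]
  | cons p G ih =>
    obtain ⟨ks, v⟩ := p
    simp only [pvFlat, List.flatMap_cons, List.foldl_append] at *
    rw [loop_group tl v ks acc (hfresh (ks, v) (by simp))]
    simp only [List.map_cons, List.nodup_cons] at hnd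
    by_cases hm : ks.any (fun k => PySem.Str.isIn k tl) = true
    · rw [if_pos hm, ih (acc ++ [v])
        (by intro q hq
            simp only [List.mem_append, List.mem_singleton]
            rintro (hq1 | hq1)
            · exact hfresh q (by simp [hq]) hq1
            · exact hnd.1 (hq1 ▸ List.mem_map_of_mem hq)) hnd.2, pickTypes_cons, if_pos hm]
      simp
    · simp only [Bool.not_eq_true] at hm
      rw [hm]
      simp only [Bool.false_eq_true, if_false]
      rw [ih acc (fun q hq => hfresh q (by simp [hq])) hnd.2, pickTypes_cons,
        if_neg (by simp only [hm]; exact Bool.false_ne_true)]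

-- ===== VERDICT (by name: the statement is the Claim_ definition above) =====
theorem extract_route_types_spec : Claim_equal_extract_route_types := by
  intro text _
  unfold Spec_extract_route_types
  cases text with
  | none => decide
  | some s =>
    by_cases hs : s = ""
    · subst hs; decide
    · simp only [extract_route_types, extract_route_types_alt, Option.getD]
      rw [if_neg hs, ← pvFlat_eq,
        show (fun (types : List String) (kv : String × String) =>
            if PySem.Str.isIn kv.1 (PySem.Str.lower s) && !(types.contains kv.2)
            then types ++ [kv.2] else types) = pvStep (PySem.Str.lower s) from rfl,
        loop_flat (PySem.Str.lower s) invertedList [] (by simp) (by decide)]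
      simp
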